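-- pv_equiv track=rewrite | github.com/mazicwong/Some_Python_Project | 泰迪杯尝试/爬取相似URL/爬取相似url.py | get_re
-- ===== SOURCE A (Python) =====
-- def get_re(url):
--     url = url[7:]  # 去除http://
--     Len = len(url)
--     p = "http://"  # 这里不能用r,因为在下面str->bytes的时候\d会变成\\d
--     i = 0
--     while i < Len:
--         if url[i] == '.':
--             p += '.'
--         elif 'a' <= url[i] <= 'z':  # 不能直接判isplpha，因为str[i]中全都是字符
--             p += '[a-z]'
--         elif 'A' <= url[i] <= 'Z':  #http://www.shdxlt.cn/ShowPost.asp?ThreadID=144952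
--             p += '[A-Z]'
--         elif '0' <= url[i] <= 'z':
--             p += '\d'
--         else:
--             p += url[i]
--         i += 1
--     return p
-- ===== SOURCE B (Python) =====
-- _REPL = ('.', '[a-z]', '[A-Z]', '\\d')
--
--
-- def _cls(c):
--     if c == '.':
--         return 0
--     if 'a' <= c <= 'z':
--         return 1
--     if 'A' <= c <= 'Z':
--         return 2
--     if '0' <= c <= 'z':
--         return 3
--     return 4
--
--
-- def get_re(url):
--     s = url[7:]
--     n = len(s)
--     out = ["http://"]
--     i = 0
--     while i < n:
--         k = _cls(s[i])
--         j = i + 1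
--         while j < n and _cls(s[j]) == k:
--             j += 1
--         out.append(s[i:j] if k == 4 else _REPL[k] * (j - i))
--         i = j
--     return ''.join(out)
-- ===== Notes on version B (the rewrite author's own statement) =====
-- stated objective: faster
-- what changed: Replaces A's per-character if/elif dispatch with repeated string += by a two-pointer run-compression scan: group maximal runs of same-class characters, emit one piece per run (replacement string repeated run-length, or the raw slice for pass-through runs), and join the pieces once.
import Mathlib
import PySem

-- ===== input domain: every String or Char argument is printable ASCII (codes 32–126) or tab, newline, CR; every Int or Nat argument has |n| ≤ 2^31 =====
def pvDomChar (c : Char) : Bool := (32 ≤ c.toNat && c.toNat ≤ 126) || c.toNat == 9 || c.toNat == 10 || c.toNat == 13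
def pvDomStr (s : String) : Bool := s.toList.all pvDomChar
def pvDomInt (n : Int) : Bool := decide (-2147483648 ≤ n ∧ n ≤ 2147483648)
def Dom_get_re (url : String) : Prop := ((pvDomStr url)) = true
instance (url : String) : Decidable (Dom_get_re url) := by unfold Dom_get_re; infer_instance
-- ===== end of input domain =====

-- B replaces A's per-character dispatch with repeated += by a two-pointer
-- run-compression scan: maximal runs of same-class characters are emitted as one
-- piece each (replacement repeated run-length, or the raw slice), joined once.

-- ===== PORT A =====
-- A: strip "http://", then a while loop over indices appending per-character pieces.
def get_re (url : String) : String :=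
  let u : List Char := PySem.List.slice url.toList (some 7) none
  let Len : Int := u.length
  let p : List Char := "http://".toList
  let p := (PySem.List.pyRange 0 Len 1).foldl (fun acc i =>
    let c := PySem.List.pyGetD u i ' '
    if c = '.' then acc ++ ['.']
    else if 'a' ≤ c ∧ c ≤ 'z' then acc ++ "[a-z]".toList
    else if 'A' ≤ c ∧ c ≤ 'Z' then acc ++ "[A-Z]".toList
    else if '0' ≤ c ∧ c ≤ 'z' then acc ++ "\\d".toList
    else acc ++ [c]) p
  String.ofList p

-- ===== PORT B =====
-- B's _cls: character class code (0='.', 1=lower, 2=upper, 3='0'..'z' rest, 4=other).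
def pvCls (c : Char) : Nat :=
  if c = '.' then 0
  else if 'a' ≤ c ∧ c ≤ 'z' then 1
  else if 'A' ≤ c ∧ c ≤ 'Z' then 2
  else if '0' ≤ c ∧ c ≤ 'z' then 3
  else 4

-- B's _REPL tuple.
def pvRepl (k : Nat) : List Char :=
  if k = 0 then ['.']
  else if k = 1 then "[a-z]".toList
  else if k = 2 then "[A-Z]".toList
  else "\\d".toList

-- B's inner while loop: advance j while s[j] has class k.
def pvRunEnd (s : List Char) (n : Int) (k : Nat) (j : Int) : Int :=
  if j < n ∧ pvCls (PySem.List.pyGetD s j ' ') = k then pvRunEnd s n k (j + 1) else j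
termination_by (n - j).toNat
decreasing_by omega

-- cited by pvLoop's decreasing_by (termination of the outer loop).
theorem le_pvRunEnd (s : List Char) (n : Int) (k : Nat) (j : Int) : j ≤ pvRunEnd s n k j := by
  induction j using pvRunEnd.induct (s := s) (n := n) (k := k) with
  | case1 j h ih => rw [pvRunEnd]; rw [if_pos h]; omega
  | case2 j h => rw [pvRunEnd]; rw [if_neg h]

-- B's outer while loop: one piece per maximal run, accumulated in out.
def pvLoop (s : List Char) (n : Int) (i : Int) (out : List (List Char)) : List (List Char) :=
  if _hi : i < n then
    let k := pvCls (PySem.List.pyGetD s i ' ')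
    let j := pvRunEnd s n k (i + 1)
    let piece := if k = 4 then PySem.List.slice s (some i) (some j)
                 else (List.replicate (j - i).toNat (pvRepl k)).flatten
    pvLoop s n j (out ++ [piece])
  else out
termination_by (n - i).toNat
decreasing_by
  have := le_pvRunEnd s n (pvCls (PySem.List.pyGetD s i ' ')) (i + 1)
  omega

def get_re_alt (url : String) : String :=
  let s : List Char := PySem.List.slice url.toList (some 7) none
  let n : Int := s.length
  String.ofList (pvLoop s n 0 ["http://".toList]).flatten

-- ===== PRECONDITION & SPEC =====
def Spec_get_re (url : String) (out : String) : Prop := out = get_re_alt url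
instance (url : String) (out : String) : Decidable (Spec_get_re url out) := by unfold Spec_get_re; infer_instance

-- ===== CLAIM (what is proved, stated in full; the proofs are below) =====
def Claim_equal_get_re : Prop := ∀ (url : String), Dom_get_re url → Spec_get_re url (get_re url)

-- ===== LEMMAS AND PROOFS =====

-- A's per-character dispatch, as a function.
def pvStepA (c : Char) : List Char :=
  if c = '.' then ['.']
  else if 'a' ≤ c ∧ c ≤ 'z' then "[a-z]".toList
  else if 'A' ≤ c ∧ c ≤ 'Z' then "[A-Z]".toList
  else if '0' ≤ c ∧ c ≤ 'z' then "\\d".toList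
  else [c]

theorem pvStepA_eq (c : Char) :
    pvStepA c = if pvCls c = 4 then [c] else pvRepl (pvCls c) := by
  unfold pvStepA pvCls pvRepl
  split_ifs <;> simp_all

theorem pvRunEnd_spec (s : List Char) (n : Int) (k : Nat) (j : Int) :
    (j ≤ n → pvRunEnd s n k j ≤ n) ∧
    ∀ m, j ≤ m → m < pvRunEnd s n k j → pvCls (PySem.List.pyGetD s m ' ') = k := by
  induction j using pvRunEnd.induct (s := s) (n := n) (k := k) with
  | case1 j h ih =>
    rw [pvRunEnd]; rw [if_pos h]
    refine ⟨fun _ => ih.1 (by omega), ?_⟩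
    intro m hm1 hm2
    rcases eq_or_lt_of_le hm1 with rfl | hlt
    · exact h.2
    · exact ih.2 m (by omega) hm2
  | case2 j h =>
    rw [pvRunEnd]; rw [if_neg h]
    exact ⟨fun hle => hle, by omega⟩

theorem pvFlatMap_const {α β : Type} (l : List α) (r : List β) :
    l.flatMap (fun _ => r) = (List.replicate l.length r).flatten := by
  induction l with
  | nil => rfl
  | cons x xs ih => simp [List.flatMap_cons, List.replicate_succ, ih]

theorem pvFlatMap_congr {α β : Type} (l : List α) (f g : α → List β)
    (h : ∀ x ∈ l, f x = g x) : l.flatMap f = l.flatMap g := by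
  induction l with
  | nil => rfl
  | cons x xs ih =>
    simp only [List.flatMap_cons]
    rw [h x (List.mem_cons_self ..), ih (fun y hy => h y (List.mem_cons_of_mem _ hy))]

-- the run invariant: pvLoop's flattened output is the per-character flatMap of the tail.
theorem pvLoop_flatten (s : List Char) :
    ∀ d (i : Int) (out : List (List Char)), 0 ≤ i → ((s.length : Int) - i).toNat ≤ d →
    (pvLoop s (s.length : Int) i out).flatten = out.flatten ++ (s.drop i.toNat).flatMap pvStepA := by
  intro d
  induction d with
  | zero =>
    intro i out h0 hd
    rw [pvLoop]
    have hge : ¬ (i < (s.length : Int)) := by omega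
    rw [dif_neg hge]
    rw [List.drop_eq_nil_of_le (by omega)]
    simp
  | succ d ih =>
    intro i out h0 hd
    rw [pvLoop]
    by_cases hi : i < (s.length : Int)
    · rw [dif_pos hi]
      have hjlo : i + 1 ≤ pvRunEnd s (s.length : Int) (pvCls (PySem.List.pyGetD s i ' ')) (i + 1) :=
        le_pvRunEnd ..
      obtain ⟨hle, hmid⟩ := pvRunEnd_spec s (s.length : Int) (pvCls (PySem.List.pyGetD s i ' ')) (i + 1)
      have hjhi : pvRunEnd s (s.length : Int) (pvCls (PySem.List.pyGetD s i ' ')) (i + 1) ≤ (s.length : Int) :=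
        hle (by omega)
      set k := pvCls (PySem.List.pyGetD s i ' ') with hk
      set j := pvRunEnd s (s.length : Int) k (i + 1) with hjdef
      -- every character of the run [i, j) has class k
      have hrun : ∀ m : Int, i ≤ m → m < j → pvCls (PySem.List.pyGetD s m ' ') = k := by
        intro m hm1 hm2
        rcases eq_or_lt_of_le hm1 with rfl | hlt
        · rfl
        · exact hmid m (by omega) hm2
      clear_value k j
      simp only [← hjdef]
      rw [ih j _ (by omega) (by omega)]
      -- split the tail at the run boundary
      have hsplit : s.drop i.toNat =
          (s.drop i.toNat).take (j - i).toNat ++ s.drop j.toNat := by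
        conv_lhs => rw [← List.take_append_drop (j - i).toNat (s.drop i.toNat)]
        rw [List.drop_drop]
        have hidx : i.toNat + (j - i).toNat = j.toNat := by omega
        rw [hidx]
      rw [hsplit, List.flatMap_append, List.flatten_append]
      simp only [List.flatten]
      rw [List.append_assoc]
      congr 1
      congr 1
      -- the piece equals the flatMap over the run
      have hcls : ∀ c ∈ (s.drop i.toNat).take (j - i).toNat, pvCls c = k := by
        intro c hc
        obtain ⟨p, hp, hpeq⟩ := List.mem_iff_getElem.mp hc
        have hplen : i.toNat + p < s.length := by
          simp at hp
          omega
        have hgl : ((s.drop i.toNat).take (j - i).toNat)[p] = s[i.toNat + p]'hplen := by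
          simp
        have hm := hrun ((i.toNat + p : Nat) : Int) (by omega) (by
          have : p < (j - i).toNat := by simp at hp; omega
          omega)
        rw [PySem.List.pyGetD_eq_getElem s ' ' (by omega) (by exact_mod_cast hplen)] at hm
        rw [← hpeq, hgl]
        simp only [Int.toNat_natCast] at hm
        exact hm
      by_cases h4 : k = 4
      · rw [if_pos h4]
        have hfm : ((s.drop i.toNat).take (j - i).toNat).flatMap pvStepA
            = ((s.drop i.toNat).take (j - i).toNat).flatMap (fun c => [c]) := by
          apply pvFlatMap_congr
          intro c hc
          rw [pvStepA_eq, hcls c hc, h4, if_pos rfl]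
        rw [hfm, List.flatMap_singleton']
        rw [PySem.List.slice_toNat s (by omega) (by omega)]
        have hidx : j.toNat - i.toNat = (j - i).toNat := by omega
        rw [hidx]
        exact List.append_nil _
      · rw [if_neg h4]
        have hfm : ((s.drop i.toNat).take (j - i).toNat).flatMap pvStepA
            = ((s.drop i.toNat).take (j - i).toNat).flatMap (fun _ => pvRepl k) := by
          apply pvFlatMap_congr
          intro c hc
          rw [pvStepA_eq, hcls c hc, if_neg h4]
        rw [hfm, pvFlatMap_const]
        have hlen : ((s.drop i.toNat).take (j - i).toNat).length = (j - i).toNat := by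
          simp
          omega
        rw [hlen]
        exact List.append_nil _
    · rw [dif_neg hi]
      rw [List.drop_eq_nil_of_le (by omega)]
      simp

-- ===== VERDICT (by name: the statement is the Claim_ definition above) =====
set_option maxRecDepth 4000 in
theorem get_re_spec : Claim_equal_get_re := by
  intro url _
  unfold Spec_get_re get_re get_re_alt
  simp only
  have hbody : (fun (acc : List Char) (i : Int) =>
      let c := PySem.List.pyGetD (PySem.List.slice url.toList (some 7) none) i ' '
      if c = '.' then acc ++ ['.']
      else if 'a' ≤ c ∧ c ≤ 'z' then acc ++ "[a-z]".toList
      else if 'A' ≤ c ∧ c ≤ 'Z' then acc ++ "[A-Z]".toList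
      else if '0' ≤ c ∧ c ≤ 'z' then acc ++ "\\d".toList
      else acc ++ [c])
      = (fun acc i => acc ++ pvStepA (PySem.List.pyGetD (PySem.List.slice url.toList (some 7) none) i ' ')) := by
    funext acc i
    simp only [pvStepA]
    split_ifs <;> rfl
  rw [hbody]
  rw [PySem.List.foldl_pyRange_zero_pyGetD' (PySem.List.slice url.toList (some 7) none) ' '
        (fun acc c => acc ++ pvStepA c) "http://".toList]
  rw [PySem.List.foldl_append_eq_flatMap]
  rw [pvLoop_flatten (PySem.List.slice url.toList (some 7) none)
        ((PySem.List.slice url.toList (some 7) none).length) 0 _ (by omega) (by omega)]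
  simp
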